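-- pv_equiv track=rewrite | github.com/GreenleafLab/amplicon-smf | workflow/scripts/classify_single_molecule_binding_v3.py | recursive_1_placer
-- ===== SOURCE A (Python) =====
-- from copy import copy
--
-- def recursive_1_placer(lst, spacing, start_idx):
--     '''
--     places 1s into an empty array of 0s subject to spacing constraints between adjacent 1s
--     helper function for below, recursive
--     '''
--     to_return = [copy(lst)]
--     if start_idx < len(lst):
--         for idx in range(start_idx, len(lst)):
--             new_lst = copy(lst)
--             assert new_lst[idx] == 0
--             new_lst[idx] = 1
--             to_return += recursive_1_placer(copy(new_lst), spacing, idx+spacing)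
--     return to_return
-- ===== SOURCE B (Python) =====
-- from copy import copy
--
-- def recursive_1_placer(lst, spacing, start_idx):
--     '''
--     places 1s into an empty array of 0s subject to spacing constraints between adjacent 1s
--     iterative version: explicit-stack preorder DFS instead of recursion
--     '''
--     result = []
--     stack = [(copy(lst), start_idx)]
--     while stack:
--         cur, idx0 = stack.pop()
--         result.append(copy(cur))
--         for idx in reversed(range(idx0, len(cur))):
--             new_lst = copy(cur)
--             assert new_lst[idx] == 0
--             new_lst[idx] = 1
--             stack.append((new_lst, idx + spacing))
--     return result
-- ===== Notes on version B (the rewrite author's own statement) =====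
-- stated objective: alternative
-- what changed: The recursion is replaced by an explicit-stack preorder DFS: a worklist of (list, next_index) pairs is popped in a loop, each popped list appended to the result, and children pushed in reverse index order, removing recursion entirely.
import Mathlib
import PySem

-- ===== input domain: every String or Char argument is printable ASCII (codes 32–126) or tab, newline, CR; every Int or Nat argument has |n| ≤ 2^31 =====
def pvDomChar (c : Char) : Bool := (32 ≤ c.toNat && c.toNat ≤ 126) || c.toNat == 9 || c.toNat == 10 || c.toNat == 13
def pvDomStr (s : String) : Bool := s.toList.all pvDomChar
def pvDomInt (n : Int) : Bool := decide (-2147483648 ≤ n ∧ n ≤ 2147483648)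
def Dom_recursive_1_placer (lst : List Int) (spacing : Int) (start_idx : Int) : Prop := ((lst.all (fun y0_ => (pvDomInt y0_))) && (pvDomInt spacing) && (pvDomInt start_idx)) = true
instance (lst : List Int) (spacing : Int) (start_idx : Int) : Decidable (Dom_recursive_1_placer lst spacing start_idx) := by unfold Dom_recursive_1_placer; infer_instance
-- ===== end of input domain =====

-- B replaces A's recursion by an explicit-stack preorder DFS (same cost, no recursion);
-- equivalence is claimed on Pre_ (start_idx ≥ len, or start_idx ≥ 0, spacing ≥ 1 and zero suffix).

-- ===== PORT A =====
-- Fuel makes A's recursion total in Lean; on Pre_ inputs depth ≤ lst.length + 1, so the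
-- top-level fuel lst.length + 1 is never exhausted there.  'lst.set idx.toNat 1' is exact
-- for 0 ≤ idx (guaranteed on Pre_ inputs); the assert is the 'pyGet? = some 0' guard
-- (its failure branch, Python's AssertionError, is outside Pre_).
def pvRecA : Nat → List Int → Int → Int → List (List Int)
  | 0, _, _, _ => []
  | Nat.succ f, lst, spacing, start_idx =>
    let to_return : List (List Int) := [lst]
    if start_idx < (lst.length : Int) then
      (PySem.List.pyRange start_idx (lst.length : Int) 1).foldl
        (fun acc idx =>
          if PySem.List.pyGet? lst idx = some 0 then
            acc ++ pvRecA f (lst.set idx.toNat 1) spacing (idx + spacing)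
          else acc)
        to_return
    else to_return

def recursive_1_placer (lst : List Int) (spacing : Int) (start_idx : Int) : List (List Int) :=
  pvRecA (lst.length + 1) lst spacing start_idx

-- ===== PORT B =====
-- Children of a popped (cur, idx0): one entry per idx in range(idx0, len cur), pushed onto the
-- stack in reverse idx order (head of the list = top of the stack), so after the pushes the
-- stack is (children in increasing idx order) ++ rest.  Same assert guard as in port A.
def pvChildren (cur : List Int) (spacing : Int) (idx0 : Int) : List (List Int × Int) :=
  (PySem.List.pyRange idx0 (cur.length : Int) 1).filterMap
    (fun idx =>
      if PySem.List.pyGet? cur idx = some 0 then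
        some (cur.set idx.toNat 1, idx + spacing)
      else none)

-- The while loop of Source B; fuel bounds the number of pops (never exhausted on Pre_ inputs).
def pvLoop (spacing : Int) : Nat → List (List Int × Int) → List (List Int) → List (List Int)
  | 0, _, result => result
  | Nat.succ _, [], result => result
  | Nat.succ f, (cur, idx0) :: rest, result =>
    pvLoop spacing f (pvChildren cur spacing idx0 ++ rest) (result ++ [cur])

def recursive_1_placer_alt (lst : List Int) (spacing : Int) (start_idx : Int) : List (List Int) :=
  pvLoop spacing ((lst.length + 1) ^ (lst.length + 1)) [(lst, start_idx)] []

-- ===== PRECONDITION & SPEC =====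
-- Pre_ excludes the inputs where A raises an AssertionError (a nonzero entry at an index
-- ≥ start_idx, or spacing ≤ 0 driving the recursion back onto a placed 1) and negative
-- start_idx, where any value A returns is an accident of Python's negative-index wraparound
-- (B performs the same index operations and returns the same value there, but the claim
-- does not cover that corner).
def Pre_recursive_1_placer (lst : List Int) (spacing : Int) (start_idx : Int) : Prop :=
  ((lst.length : Int) ≤ start_idx) ∨
  (0 ≤ start_idx ∧ 1 ≤ spacing ∧
    ∀ j ∈ List.range lst.length, start_idx ≤ (j : Int) → lst.getD j 0 = 0)
instance (lst : List Int) (spacing : Int) (start_idx : Int) : Decidable (Pre_recursive_1_placer lst spacing start_idx) := by unfold Pre_recursive_1_placer; infer_instance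

def pvWitness_recursive_1_placer : List Int × Int × Int := ([0, 0, 0], 2, 0)

def Spec_recursive_1_placer (lst : List Int) (spacing : Int) (start_idx : Int) (out : List (List Int)) : Prop := out = recursive_1_placer_alt lst spacing start_idx
instance (lst : List Int) (spacing : Int) (start_idx : Int) (out : List (List Int)) : Decidable (Spec_recursive_1_placer lst spacing start_idx out) := by unfold Spec_recursive_1_placer; infer_instance

-- ===== CLAIM (what is proved, stated in full; the proofs are below) =====
def Claim_equal_recursive_1_placer : Prop := ∀ (lst : List Int) (spacing : Int) (start_idx : Int), Dom_recursive_1_placer lst spacing start_idx → Pre_recursive_1_placer lst spacing start_idx → Spec_recursive_1_placer lst spacing start_idx (recursive_1_placer lst spacing start_idx)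

-- ===== LEMMAS AND PROOFS =====

-- the guarded subtree A appends for index idx (proof-only abbreviation)
def pvSub (f : Nat) (cur : List Int) (sp : Int) (idx : Int) : List (List Int) :=
  if PySem.List.pyGet? cur idx = some 0 then pvRecA f (cur.set idx.toNat 1) sp (idx + sp) else []

-- the guarded stack entry B pushes for index idx (proof-only abbreviation)
def pvEnt (cur : List Int) (sp : Int) (idx : Int) : Option (List Int × Int) :=
  if PySem.List.pyGet? cur idx = some 0 then some (cur.set idx.toNat 1, idx + sp) else none

-- A's foldl of guarded appends is the start value followed by the guarded subtrees.
theorem pvFoldlAppendIf {α β : Type} (p : α → Prop) [DecidablePred p] (F : α → List β) :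
    ∀ (L : List α) (init : List β),
      L.foldl (fun acc x => if p x then acc ++ F x else acc) init
        = init ++ L.flatMap (fun x => if p x then F x else []) := by
  intro L
  induction L with
  | nil => intro init; simp
  | cons a L ih =>
    intro init
    by_cases hp : p a <;> simp [hp, ih, List.append_assoc]

theorem pvRecA_succ (f : Nat) (cur : List Int) (sp i : Int) (hlt : i < (cur.length : Int)) :
    pvRecA (f + 1) cur sp i
      = [cur] ++ (PySem.List.pyRange i (cur.length : Int) 1).flatMap (pvSub f cur sp) := by
  rw [pvRecA]
  simp only [hlt, if_pos]
  exact pvFoldlAppendIf (fun idx => PySem.List.pyGet? cur idx = some 0)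
    (fun idx => pvRecA f (cur.set idx.toNat 1) sp (idx + sp)) _ [cur]

theorem pvRecA_succ_nil (f : Nat) (cur : List Int) (sp i : Int)
    (hge : (cur.length : Int) ≤ i) : pvRecA (f + 1) cur sp i = [cur] := by
  rw [pvRecA]; simp [not_lt.2 hge]

theorem pvChildren_eq (cur : List Int) (sp i : Int) :
    pvChildren cur sp i
      = (PySem.List.pyRange i (cur.length : Int) 1).filterMap (pvEnt cur sp) := rfl

theorem pvChildren_nil (cur : List Int) (sp i : Int) (hge : (cur.length : Int) ≤ i) :
    pvChildren cur sp i = [] := by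
  rw [pvChildren_eq, PySem.List.pyRange_one_eq_nil hge, List.filterMap_nil]

-- the stack loop ignores its fuel once the stack is empty
theorem pvLoop_nil (spacing : Int) (f : Nat) (res : List (List Int)) :
    pvLoop spacing f [] res = res := by
  cases f <;> rfl

-- one pop of the stack loop
theorem pvLoop_step (sp : Int) (f : Nat) (cur : List Int) (i : Int)
    (rest : List (List Int × Int)) (res : List (List Int)) :
    pvLoop sp (f + 1) ((cur, i) :: rest) res
      = pvLoop sp f (pvChildren cur sp i ++ rest) (res ++ [cur]) := rfl

theorem pvFlatLen {alpha : Type} (B : Nat) :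
    ∀ (L : List alpha) (F : alpha → List (List Int)),
      (∀ x ∈ L, (F x).length ≤ B) → (L.flatMap F).length ≤ L.length * B := by
  intro L
  induction L with
  | nil => intro F _; simp
  | cons a L ih =>
    intro F h
    simp only [List.flatMap_cons, List.length_append, List.length_cons]
    have h1 := h a (by simp)
    have h2 := ih F (fun x hx => h x (by simp [hx]))
    calc (F a).length + (L.flatMap F).length ≤ B + L.length * B := Nat.add_le_add h1 h2
      _ = (L.length + 1) * B := by ring

-- size bound: A's output has at most (len+1)^fuel entries (for the admitted parameters)
theorem pvSize (sp : Int) (hsp : 1 ≤ sp) :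
    ∀ (f : Nat) (cur : List Int) (i : Int), 0 ≤ i →
      (pvRecA f cur sp i).length ≤ (cur.length + 1) ^ f := by
  intro f
  induction f with
  | zero => intro cur i _; simp [pvRecA]
  | succ f ih =>
    intro cur i hi
    by_cases hlt : i < (cur.length : Int)
    · rw [pvRecA_succ f cur sp i hlt]
      have hcat : ((PySem.List.pyRange i (cur.length : Int) 1).flatMap (pvSub f cur sp)).length
          ≤ cur.length * (cur.length + 1) ^ f := by
        have hb : ∀ idx ∈ PySem.List.pyRange i (cur.length : Int) 1,
            (pvSub f cur sp idx).length ≤ (cur.length + 1) ^ f := by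
          intro idx hidx
          have hmem := (PySem.List.mem_pyRange_one).1 hidx
          by_cases hp : PySem.List.pyGet? cur idx = some 0
          · have := ih (cur.set idx.toNat 1) (idx + sp) (by omega)
            simpa [pvSub, hp] using this
          · simp [pvSub, hp]
        have h1 := pvFlatLen ((cur.length + 1) ^ f) (PySem.List.pyRange i (cur.length : Int) 1)
          (pvSub f cur sp) hb
        have h2 : (PySem.List.pyRange i (cur.length : Int) 1).length ≤ cur.length := by
          rw [PySem.List.length_pyRange_one]; omega
        calc ((PySem.List.pyRange i (cur.length : Int) 1).flatMap (pvSub f cur sp)).length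
            ≤ (PySem.List.pyRange i (cur.length : Int) 1).length * (cur.length + 1) ^ f := h1
          _ ≤ cur.length * (cur.length + 1) ^ f := Nat.mul_le_mul_right _ h2
      have hpow : 1 ≤ (cur.length + 1) ^ f := Nat.one_le_pow _ _ (by omega)
      simp only [List.length_append, List.length_cons, List.length_nil]
      calc 1 + ((PySem.List.pyRange i (cur.length : Int) 1).flatMap (pvSub f cur sp)).length
          ≤ 1 + cur.length * (cur.length + 1) ^ f := Nat.add_le_add_left hcat 1
        _ ≤ (cur.length + 1) ^ (f + 1) := by rw [pow_succ]; nlinarith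
    · rw [pvRecA_succ_nil f cur sp i (by omega)]
      have : 1 ≤ (cur.length + 1) ^ (f + 1) := Nat.one_le_pow _ _ (by omega)
      simpa using this

-- Main invariant: popping one entry with enough fuel emits exactly A's subtree for that entry.
theorem pvLoopMain (sp : Int) (hsp : 1 ≤ sp) :
    ∀ (f : Nat) (cur : List Int) (i : Int), 0 ≤ i → (cur.length : Int) < i + f → 1 ≤ f →
      ∀ (g : Nat) (rest : List (List Int × Int)) (res : List (List Int)),
        pvLoop sp ((pvRecA f cur sp i).length + g) ((cur, i) :: rest) res
          = pvLoop sp g rest (res ++ pvRecA f cur sp i) := by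
  intro f
  induction f with
  | zero => intro cur i _ _ hf; omega
  | succ f ih =>
    intro cur i hi hlen _ g rest res
    by_cases hlt : i < (cur.length : Int)
    · have hf1 : 1 ≤ f := by omega
      -- inner induction over the list of child indices
      have inner : ∀ (L : List Int), (∀ idx ∈ L, i ≤ idx ∧ idx < (cur.length : Int)) →
          ∀ (g : Nat) (rest : List (List Int × Int)) (res : List (List Int)),
            pvLoop sp ((L.flatMap (pvSub f cur sp)).length + g)
                (L.filterMap (pvEnt cur sp) ++ rest) res
              = pvLoop sp g rest (res ++ L.flatMap (pvSub f cur sp)) := by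
        intro L
        induction L with
        | nil => intro _ g rest res; simp
        | cons a L ihL =>
          intro hmem g rest res
          have ha := hmem a (by simp)
          by_cases hp : PySem.List.pyGet? cur a = some 0
          · have hsub : pvSub f cur sp a = pvRecA f (cur.set a.toNat 1) sp (a + sp) := by
              simp [pvSub, hp]
            have hent : pvEnt cur sp a = some (cur.set a.toNat 1, a + sp) := by
              simp [pvEnt, hp]
            simp only [List.flatMap_cons, List.filterMap_cons, hsub, hent,
              List.length_append, List.cons_append]
            rw [Nat.add_assoc]
            have h1 := ih (cur.set a.toNat 1) (a + sp)
              (by omega)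
              (by simp only [List.length_set]; omega)
              hf1
              ((L.flatMap (pvSub f cur sp)).length + g)
              (L.filterMap (pvEnt cur sp) ++ rest) res
            rw [h1, ihL (fun idx h => hmem idx (by simp [h])), List.append_assoc]
          · have hsub : pvSub f cur sp a = [] := by simp [pvSub, hp]
            have hent : pvEnt cur sp a = none := by simp [pvEnt, hp]
            simp only [List.flatMap_cons, List.filterMap_cons, hsub, hent,
              List.nil_append]
            exact ihL (fun idx h => hmem idx (by simp [h])) g rest res
      have hi' := inner (PySem.List.pyRange i (cur.length : Int) 1)
        (fun idx h => (PySem.List.mem_pyRange_one).1 h) g rest (res ++ [cur])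
      rw [pvRecA_succ f cur sp i hlt]
      have hlen2 : (([cur] ++ (PySem.List.pyRange i (cur.length : Int) 1).flatMap
            (pvSub f cur sp)).length + g)
          = ((PySem.List.pyRange i (cur.length : Int) 1).flatMap (pvSub f cur sp)).length
            + g + 1 := by
        simp only [List.length_append, List.length_cons, List.length_nil]
        omega
      rw [hlen2, pvLoop_step, pvChildren_eq, hi', ← List.append_assoc]
    · rw [pvRecA_succ_nil f cur sp i (by omega)]
      have hlen2 : ([cur].length + g) = g + 1 := by simp; omega
      rw [hlen2, pvLoop_step, pvChildren_nil cur sp i (by omega), List.nil_append]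

-- ===== VERDICT (by name: the statement is the Claim_ definition above) =====
theorem recursive_1_placer_spec : Claim_equal_recursive_1_placer := by
  intro lst sp s _ hpre
  unfold Spec_recursive_1_placer recursive_1_placer recursive_1_placer_alt
  rcases hpre with hbig | ⟨hs, hsp, _⟩
  · -- start_idx ≥ len: both produce [lst]
    have hpos : 0 < (lst.length + 1) ^ (lst.length + 1) := Nat.one_le_pow _ _ (by omega)
    obtain ⟨k, hk⟩ := Nat.exists_eq_succ_of_ne_zero (Nat.pos_iff_ne_zero.1 hpos)
    rw [pvRecA_succ_nil lst.length lst sp s hbig, hk, Nat.succ_eq_add_one, pvLoop_step,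
      pvChildren_nil lst sp s hbig, List.nil_append, List.nil_append, pvLoop_nil]
  · -- the main case
    have hsz : (pvRecA (lst.length + 1) lst sp s).length ≤ (lst.length + 1) ^ (lst.length + 1) :=
      pvSize sp hsp (lst.length + 1) lst s hs
    have hfuel : (pvRecA (lst.length + 1) lst sp s).length
        + ((lst.length + 1) ^ (lst.length + 1) - (pvRecA (lst.length + 1) lst sp s).length)
        = (lst.length + 1) ^ (lst.length + 1) := by omega
    have h := pvLoopMain sp hsp (lst.length + 1) lst s hs (by push_cast; omega) (by omega)
      ((lst.length + 1) ^ (lst.length + 1) - (pvRecA (lst.length + 1) lst sp s).length) [] []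
    rw [hfuel] at h
    rw [h, pvLoop_nil, List.nil_append]
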